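-- pv_equiv track=rewrite | github.com/yuan7778/An-STP-based-model-toward-designing-binary-diffusion-layers-with-the-lowest-latency | model.py | generate_hamming_weight_vectors
-- ===== SOURCE A (Python) =====
-- import itertools
--
-- def generate_hamming_weight_vectors(n, i):
--     all_vectors = itertools.product('01', repeat=n)
--     hamming_i_vectors = set()
--     for vector in all_vectors:
--         if vector.count('1') == i:
--             hamming_i_vectors.add(''.join(vector))
--     vectors = sorted(list(hamming_i_vectors))
--     return vectors
-- ===== SOURCE B (Python) =====
-- def generate_hamming_weight_vectors(n, i):
--     # Row DP: rows[j] = all length-m strings with j ones, in increasing order,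
--     # built by prepending '0'/'1'; already sorted, so no set and no final sort.
--     if i < 0 or i > n:
--         return []
--     rows = [['']] + [[] for _ in range(i)]
--     for _ in range(n):
--         rows = [['0' + s for s in cur] + ['1' + s for s in prev]
--                 for prev, cur in zip([[]] + rows, rows)]
--     return rows[i]
-- ===== Notes on version B (the rewrite author's own statement) =====
-- stated objective: alternative
-- what changed: A enumerates all 2^n binary tuples, filters by weight, deduplicates into a set and sorts; B builds the weight-0..i rows of a Pascal-style DP by prepending '0'/'1', generating exactly the answer strings already in sorted order with no set and no sort.
-- crash fix: On n < 0 A raises ValueError (itertools.product with negative repeat); B returns []. — e.g. on generate_hamming_weight_vectors(-1, 0): A raises ValueError, B returns []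
import Mathlib
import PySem

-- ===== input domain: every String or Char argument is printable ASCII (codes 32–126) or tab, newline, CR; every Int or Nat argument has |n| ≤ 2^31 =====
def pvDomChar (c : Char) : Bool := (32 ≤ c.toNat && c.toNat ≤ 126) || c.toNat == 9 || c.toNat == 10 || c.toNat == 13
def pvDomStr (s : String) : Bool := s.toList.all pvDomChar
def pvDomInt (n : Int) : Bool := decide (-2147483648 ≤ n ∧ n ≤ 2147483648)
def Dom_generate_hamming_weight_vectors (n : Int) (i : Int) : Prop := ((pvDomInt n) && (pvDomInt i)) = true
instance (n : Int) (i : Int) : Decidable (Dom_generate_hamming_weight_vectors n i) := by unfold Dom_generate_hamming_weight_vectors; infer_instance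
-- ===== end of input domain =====

-- B replaces A's enumerate-all-2^n-strings / filter / set / sort pipeline by a row DP
-- that generates only the weight-≤ i strings, directly in sorted order (no set, no sort).

-- ===== PORT A =====
-- itertools.product('01', repeat=n): the first coordinate varies slowest.
def pvProd01 : Nat → List (List Char)
  | 0 => [[]]
  | m + 1 => (pvProd01 m).map (List.cons '0') ++ (pvProd01 m).map (List.cons '1')

def generate_hamming_weight_vectors (n : Int) (i : Int) : List String :=
  let all_vectors := pvProd01 n.toNat
  let hamming_i_vectors : PySem.Set String :=
    all_vectors.foldl
      (fun acc v =>
        if ((PySem.List.count v '1' : Int) == i) then PySem.Set.add acc (String.ofList v)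
        else acc)
      PySem.Set.empty
  PySem.List.sorted hamming_i_vectors (fun x => x) false

-- ===== PORT B =====
-- Python strings are modelled as `List Char` inside the DP ('0' + s = cons) and joined
-- to `String` at the return, which is exact.
def pvRowsStep (rows : List (List (List Char))) : List (List (List Char)) :=
  ((([] : List (List Char)) :: rows).zip rows).map
    (fun pc => pc.2.map (List.cons '0') ++ pc.1.map (List.cons '1'))

def generate_hamming_weight_vectors_alt (n : Int) (i : Int) : List String :=
  if i < 0 || n < i then []
  else
    let rows0 : List (List (List Char)) := [[[]]] ++ List.replicate i.toNat []
    let rows := (List.range n.toNat).foldl (fun r _ => pvRowsStep r) rows0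
    -- rows[i]: always in range (rows has length i+1, 0 ≤ i), so `.getD []` is never taken
    ((PySem.List.pyGet? rows i).getD []).map String.ofList

-- ===== PRECONDITION & SPEC =====
-- Pre_ excludes exactly n < 0, where A raises ValueError (itertools.product with negative repeat).
def Pre_generate_hamming_weight_vectors (n : Int) (i : Int) : Prop := 0 ≤ n
instance (n : Int) (i : Int) : Decidable (Pre_generate_hamming_weight_vectors n i) := by unfold Pre_generate_hamming_weight_vectors; infer_instance
def pvWitness_generate_hamming_weight_vectors : Int × Int := (3, 1)

-- On n < 0 A raises ValueError ("repeat argument cannot be negative") while B returns [].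
def Raises_generate_hamming_weight_vectors (n : Int) (i : Int) : Prop := n < 0
instance (n : Int) (i : Int) : Decidable (Raises_generate_hamming_weight_vectors n i) := by unfold Raises_generate_hamming_weight_vectors; infer_instance
def pvRaiseWitness_generate_hamming_weight_vectors : Int × Int := (-1, 0)
def pvRaiseWitnessOut_generate_hamming_weight_vectors : List String := []

def Spec_generate_hamming_weight_vectors (n : Int) (i : Int) (out : List String) : Prop := out = generate_hamming_weight_vectors_alt n i
instance (n : Int) (i : Int) (out : List String) : Decidable (Spec_generate_hamming_weight_vectors n i out) := by unfold Spec_generate_hamming_weight_vectors; infer_instance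

-- ===== CLAIM (what is proved, stated in full; the proofs are below) =====
def Claim_equal_generate_hamming_weight_vectors : Prop := ∀ (n : Int) (i : Int), Dom_generate_hamming_weight_vectors n i → Pre_generate_hamming_weight_vectors n i → Spec_generate_hamming_weight_vectors n i (generate_hamming_weight_vectors n i)
def Claim_raises_generate_hamming_weight_vectors : Prop := (∀ (n : Int) (i : Int), Dom_generate_hamming_weight_vectors n i → Raises_generate_hamming_weight_vectors n i → ¬ Pre_generate_hamming_weight_vectors n i) ∧ (Dom_generate_hamming_weight_vectors (pvRaiseWitness_generate_hamming_weight_vectors.1) (pvRaiseWitness_generate_hamming_weight_vectors.2) ∧ Raises_generate_hamming_weight_vectors (pvRaiseWitness_generate_hamming_weight_vectors.1) (pvRaiseWitness_generate_hamming_weight_vectors.2) ∧ generate_hamming_weight_vectors_alt (pvRaiseWitness_generate_hamming_weight_vectors.1) (pvRaiseWitness_generate_hamming_weight_vectors.2) = pvRaiseWitnessOut_generate_hamming_weight_vectors)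

-- ===== LEMMAS AND PROOFS =====

-- the reference recursion: length-m binary strings (as char lists) of weight j, in
-- strictly increasing lexicographic order
def pvGenC : Nat → Int → List (List Char)
  | 0, j => if j == 0 then [[]] else []
  | m + 1, j => (pvGenC m j).map (List.cons '0') ++ (pvGenC m (j - 1)).map (List.cons '1')

theorem pvFilter_prod_eq (m : Nat) (j : Int) :
    (pvProd01 m).filter (fun v => ((PySem.List.count v '1' : Int) == j)) = pvGenC m j := by
  induction m generalizing j with
  | zero =>
    simp only [pvProd01, pvGenC, List.filter]
    by_cases h : j = 0
    · simp [h, PySem.List.count]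
    · have h0 : ((0 : Int) == j) = false := by simpa using fun hh => h hh.symm
      have h1 : (j == (0 : Int)) = false := by simpa using h
      simp [PySem.List.count, h0, h1]
  | succ m ih =>
    have e0 : ((fun v => ((PySem.List.count v '1' : Int) == j)) ∘ List.cons '0')
        = (fun v => ((PySem.List.count v '1' : Int) == j)) := by
      funext v; simp [PySem.List.count]
    have e1 : ((fun v => ((PySem.List.count v '1' : Int) == j)) ∘ List.cons '1')
        = (fun v => ((PySem.List.count v '1' : Int) == (j - 1))) := by
      funext v
      simp only [Function.comp_apply, PySem.List.count, List.count_cons_self]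
      rw [Bool.eq_iff_iff]; simp only [beq_iff_eq]; push_cast; omega
    simp only [pvProd01, pvGenC, List.filter_append, List.filter_map, e0, e1, ih]

theorem pvGenC_pairwise (m : Nat) (j : Int) : (pvGenC m j).Pairwise (· < ·) := by
  induction m generalizing j with
  | zero =>
    by_cases h : j = 0 <;> simp [pvGenC, h]
  | succ m ih =>
    simp only [pvGenC]
    rw [List.pairwise_append]
    refine ⟨?_, ?_, ?_⟩
    · rw [List.pairwise_map]
      exact (ih j).imp (fun h => List.Lex.cons h)
    · rw [List.pairwise_map]
      exact (ih (j - 1)).imp (fun h => List.Lex.cons h)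
    · intro x hx y hy
      obtain ⟨a, _, rfl⟩ := List.mem_map.mp hx
      obtain ⟨b, _, rfl⟩ := List.mem_map.mp hy
      exact List.Lex.rel (by decide)

theorem pvGenC_neg (m : Nat) (j : Int) (h : j < 0) : pvGenC m j = [] := by
  induction m generalizing j with
  | zero => simp [pvGenC]; omega
  | succ m ih => simp [pvGenC, ih j h, ih (j-1) (by omega)]

theorem pvGenC_gt (m : Nat) (j : Int) (h : (m : Int) < j) : pvGenC m j = [] := by
  induction m generalizing j with
  | zero => simp [pvGenC]; omega
  | succ m ih => simp [pvGenC, ih j (by push_cast at h ⊢; omega), ih (j-1) (by push_cast at h ⊢; omega)]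

theorem pvZip_aux (k : Nat) : ∀ (m : Nat) (j : Int) (p : List (List Char)), p = pvGenC m (j - 1) →
    ((p :: (List.range k).map (fun t : Nat => pvGenC m (j + (t : Int)))).zip
        ((List.range k).map (fun t : Nat => pvGenC m (j + (t : Int))))).map
      (fun pc => pc.2.map (List.cons '0') ++ pc.1.map (List.cons '1'))
    = (List.range k).map (fun t : Nat => pvGenC (m + 1) (j + (t : Int))) := by
  induction k with
  | zero => intro m j p _; rfl
  | succ k ih =>
    intro m j p hp
    have hsh : ∀ (m' : Nat) (f : Nat → Int → List (List Char)),
        (List.range k).map ((fun t : Nat => f m' (j + (t : Int))) ∘ Nat.succ)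
          = (List.range k).map (fun t : Nat => f m' ((j + 1) + (t : Int))) := by
      intro m' f
      apply List.map_congr_left
      intro t _
      simp only [Function.comp_apply]
      congr 1
      push_cast
      ring
    rw [List.range_succ_eq_map]
    simp only [List.map_cons, List.map_map, Nat.cast_zero, add_zero, List.zip_cons_cons]
    rw [hsh m (fun m' => pvGenC m'), hsh (m + 1) (fun m' => pvGenC m')]
    congr 1
    · show (pvGenC m j).map (List.cons '0') ++ p.map (List.cons '1') = pvGenC (m + 1) j
      rw [hp]
      rfl
    · rw [← hsh m (fun m' => pvGenC m')]
      rw [hsh m (fun m' => pvGenC m')]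
      exact ih m (j + 1) (pvGenC m j) (by congr 1; ring)

theorem pvStep_rows (k m : Nat) :
    pvRowsStep ((List.range (k + 1)).map (fun j : Nat => pvGenC m (j : Int)))
      = (List.range (k + 1)).map (fun j : Nat => pvGenC (m + 1) (j : Int)) := by
  have hz := pvZip_aux (k + 1) m 0 [] (by rw [pvGenC_neg m (0 - 1) (by omega)])
  have e : ∀ m' : Nat, (List.range (k + 1)).map (fun t : Nat => pvGenC m' (0 + (t : Int)))
      = (List.range (k + 1)).map (fun j : Nat => pvGenC m' (j : Int)) := by
    intro m'
    apply List.map_congr_left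
    intro t _
    congr 1
    ring
  rw [e m, e (m + 1)] at hz
  simpa [pvRowsStep] using hz

theorem pvRows_inv (k m : Nat) :
    (List.range m).foldl (fun r _ => pvRowsStep r) ((List.range (k + 1)).map (fun j : Nat => pvGenC 0 (j : Int)))
      = (List.range (k + 1)).map (fun j : Nat => pvGenC m (j : Int)) := by
  induction m with
  | zero => rfl
  | succ m ih =>
    rw [show List.range (m + 1) = List.range m ++ [m] from List.range_succ, List.foldl_append, ih]
    simpa using pvStep_rows k m

theorem pvRows0 (k : Nat) :
    ([[[]]] ++ List.replicate k ([] : List (List Char)))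
      = (List.range (k + 1)).map (fun j : Nat => pvGenC 0 (j : Int)) := by
  rw [List.range_succ_eq_map, List.map_cons, List.map_map]
  have : (List.range k).map ((fun j : Nat => pvGenC 0 (j : Int)) ∘ Nat.succ)
      = (List.range k).map (fun _ => ([] : List (List Char))) := by
    apply List.map_congr_left
    intro t _
    simp only [Function.comp_apply]
    simp only [pvGenC]
    rw [if_neg (by simp only [beq_iff_eq]; omega)]
  rw [this]
  simp [pvGenC, List.map_const']

theorem pvFoldl_if_add {α β : Type} [BEq β] (p : α → Bool) (f : α → β) (xs : List α) (s : PySem.Set β) :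
    xs.foldl (fun acc v => if p v then PySem.Set.add acc (f v) else acc) s
      = ((xs.filter p).map f).foldl (fun acc y => PySem.Set.add acc y) s := by
  induction xs generalizing s with
  | nil => rfl
  | cons x xs ih => by_cases h : p x <;> simp [h, ih]

theorem pvOfList_lt (a b : List Char) : String.ofList a < String.ofList b ↔ a < b := by
  rw [String.lt_iff_toList_lt]; simp

theorem pvMap_pairwise (m : Nat) (j : Int) :
    ((pvGenC m j).map String.ofList).Pairwise (· < ·) := by
  rw [List.pairwise_map]
  exact (pvGenC_pairwise m j).imp (fun h => (pvOfList_lt _ _).mpr h)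

theorem pvA_eq_gen (n i : Int) :
    generate_hamming_weight_vectors n i = (pvGenC n.toNat i).map String.ofList := by
  show PySem.List.sorted
      ((pvProd01 n.toNat).foldl
        (fun acc v =>
          if ((PySem.List.count v '1' : Int) == i) then PySem.Set.add acc (String.ofList v)
          else acc)
        PySem.Set.empty)
      (fun x => x) false = (pvGenC n.toNat i).map String.ofList
  rw [pvFoldl_if_add, pvFilter_prod_eq]
  rw [show PySem.Set.empty = ([] : List String) from rfl]
  rw [← PySem.Set.ofList_eq_foldl]
  rw [PySem.Set.ofList_eq_self_of_nodup _ ((pvMap_pairwise n.toNat i).imp (fun h => ne_of_lt h))]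
  exact PySem.List.sorted_eq_self_of_pairwise _ _ ((pvMap_pairwise n.toNat i).imp (fun h => le_of_lt h))

theorem pvB_eq_gen (n i : Int) (hn : 0 ≤ n) :
    generate_hamming_weight_vectors_alt n i = (pvGenC n.toNat i).map String.ofList := by
  unfold generate_hamming_weight_vectors_alt
  by_cases h1 : i < 0
  · simp [h1, pvGenC_neg n.toNat i h1]
  by_cases h2 : n < i
  · simp [h1, h2, pvGenC_gt n.toNat i (by rw [Int.toNat_of_nonneg hn]; omega)]
  simp only [h1, h2, decide_false, Bool.or_self, Bool.false_eq_true, if_false]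
  rw [pvRows0 i.toNat, pvRows_inv i.toNat n.toNat]
  have hi : 0 ≤ i := by omega
  have hlen : i < (((List.range (i.toNat + 1)).map (fun j : Nat => pvGenC n.toNat (j : Int))).length : Int) := by
    simp only [List.length_map, List.length_range]
    omega
  rw [PySem.List.pyGet?_eq_some_getElem _ hi hlen]
  simp only [Option.getD_some, List.getElem_map, List.getElem_range]
  rw [Int.toNat_of_nonneg hi]

-- ===== VERDICT (by name: the statement is the Claim_ definition above) =====
theorem generate_hamming_weight_vectors_spec : Claim_equal_generate_hamming_weight_vectors := by
  intro n i _ hpre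
  unfold Spec_generate_hamming_weight_vectors
  rw [pvA_eq_gen n i, pvB_eq_gen n i hpre]

theorem generate_hamming_weight_vectors_raises : Claim_raises_generate_hamming_weight_vectors := by
  unfold Claim_raises_generate_hamming_weight_vectors
  refine ⟨fun n i _ h => ?_, by decide⟩
  unfold Raises_generate_hamming_weight_vectors at h
  unfold Pre_generate_hamming_weight_vectors
  omega

-- the concrete raise-witness fact, read off the raises theorem
theorem pvRaiseWitness_ok :
    generate_hamming_weight_vectors_alt (-1) 0 = pvRaiseWitnessOut_generate_hamming_weight_vectors :=
  generate_hamming_weight_vectors_raises.2.2.2
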